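-- pv_equiv track=rewrite | github.com/huggin/lc | 202604/3741.py | minimumDistance
-- ===== SOURCE A (Python) =====
-- from typing import List
--
-- def minimumDistance(nums: List[int]) -> int:
--     ans = float("inf")
--     n = len(nums)
--     d1 = {}
--     d2 = {}
--
--     for i in range(n):
--         if nums[i] not in d1:
--             d1[nums[i]] = i
--         elif nums[i] not in d2:
--             d2[nums[i]] = d1[nums[i]]
--             d1[nums[i]] = i
--         else:
--             ans = min(ans, 2 * (i - d2[nums[i]]))
--             d2[nums[i]] = d1[nums[i]]
--             d1[nums[i]] = i
--
--     return -1 if ans == float("inf") else ans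
-- ===== SOURCE B (Python) =====
-- from typing import List
--
-- def minimumDistance(nums: List[int]) -> int:
--     # Phase 1: index every value -> ordered list of its positions.
--     pos = {}
--     for i, v in enumerate(nums):
--         pos[v] = pos.get(v, []) + [i]
--     # Phase 2: scan each group for gaps between occurrences two apart.
--     gaps = [2 * (idx[j] - idx[j - 2])
--             for idx in pos.values()
--             for j in range(2, len(idx))]
--     return min(gaps, default=-1)
-- ===== Notes on version B (the rewrite author's own statement) =====
-- stated objective: simpler
-- what changed: Replaces the interleaved rolling two-dict (last/second-last occurrence) bookkeeping with a two-phase decomposition: build a value->index-list table in one pass, then take the minimum of 2*(idx[j]-idx[j-2]) over each group.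
import Mathlib
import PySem

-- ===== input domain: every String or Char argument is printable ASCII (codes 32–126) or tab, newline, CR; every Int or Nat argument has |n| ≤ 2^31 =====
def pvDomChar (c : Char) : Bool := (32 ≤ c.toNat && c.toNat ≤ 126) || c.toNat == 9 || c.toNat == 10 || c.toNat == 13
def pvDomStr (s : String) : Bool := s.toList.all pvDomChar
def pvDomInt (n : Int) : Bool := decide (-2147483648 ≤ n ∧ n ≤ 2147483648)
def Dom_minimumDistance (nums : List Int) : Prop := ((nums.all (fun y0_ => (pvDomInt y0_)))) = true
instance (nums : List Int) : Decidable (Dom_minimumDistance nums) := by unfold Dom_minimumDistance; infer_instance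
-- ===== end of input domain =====

-- B replaces A's interleaved rolling two-dict bookkeeping by a two-phase decomposition
-- (build a value -> index-list table, then scan each group for the minimum gap); objective: simpler.


-- ===== PORT A =====
-- literal port: ans : Option Int (none = float('inf')), d1/d2 rolling dicts, one pass over range(n)
def minimumDistance (nums : List Int) : Int :=
  let s := (PySem.List.pyRange 0 (PySem.List.len nums)).foldl
      (fun (st : Option Int × PySem.Dict Int Int × PySem.Dict Int Int) i =>
        let v := PySem.List.pyGetD nums i 0
        if st.2.1.contains v = false then
          (st.1, st.2.1.insert v i, st.2.2)
        else if st.2.2.contains v = false then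
          (st.1, st.2.1.insert v i, st.2.2.insert v (st.2.1.getD v 0))
        else
          (some (match st.1 with
                 | none => 2 * (i - st.2.2.getD v 0)
                 | some m => min m (2 * (i - st.2.2.getD v 0))),
           st.2.1.insert v i, st.2.2.insert v (st.2.1.getD v 0)))
      (none, PySem.Dict.empty, PySem.Dict.empty)
  match s.1 with
  | none => -1
  | some m => m

-- ===== PORT B =====
-- literal port of Source B: phase 1 builds pos (value -> list of indices), phase 2 the gap list, then min(gaps, default=-1)
def minimumDistance_alt (nums : List Int) : Int :=
  let pos := (PySem.List.enumerate nums).foldl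
      (fun (d : PySem.Dict Int (List Int)) p => d.modify p.2 [] (fun l => l ++ [p.1]))
      PySem.Dict.empty
  let gaps := pos.values.flatMap (fun idx =>
      (PySem.List.pyRange 2 (PySem.List.len idx)).map
        (fun j => 2 * (PySem.List.pyGetD idx j 0 - PySem.List.pyGetD idx (j - 2) 0)))
  PySem.List.minD gaps (fun x => x) (-1)
-- ===== PRECONDITION & SPEC =====
def Spec_minimumDistance (nums : List Int) (out : Int) : Prop := out = minimumDistance_alt nums
instance (nums : List Int) (out : Int) : Decidable (Spec_minimumDistance nums out) := by unfold Spec_minimumDistance; infer_instance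

-- ===== CLAIM (what is proved, stated in full; the proofs are below) =====
def Claim_equal_minimumDistance : Prop := ∀ (nums : List Int), Dom_minimumDistance nums → Spec_minimumDistance nums (minimumDistance nums)

-- ===== LEMMAS AND PROOFS =====

-- proof vocabulary: opE/minFold (A's running minimum), occ (a value's index list),
-- rg (one group's gap list, B's inner comprehension), gapsAll, stA/runA (A's loop)
def opE (acc : Option Int) (g : Int) : Option Int :=
  some (match acc with | none => g | some m => min m g)
def minFold (xs : List Int) : Option Int := xs.foldl opE none
def occ (l : List Int) (v : Int) : List Int :=
  ((PySem.List.enumerate l).filter (fun p => p.2 == v)).map (fun p => p.1)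
def rg (idx : List Int) : List Int :=
  (PySem.List.pyRange 2 (PySem.List.len idx)).map
    (fun j => 2 * (PySem.List.pyGetD idx j 0 - PySem.List.pyGetD idx (j - 2) 0))
def gapsAll (l : List Int) : List Int :=
  (PySem.Set.ofList l).flatMap (fun v => rg (occ l v))
def stA (st : Option Int × PySem.Dict Int Int × PySem.Dict Int Int) (i v : Int) :
    Option Int × PySem.Dict Int Int × PySem.Dict Int Int :=
  if st.2.1.contains v = false then
    (st.1, st.2.1.insert v i, st.2.2)
  else if st.2.2.contains v = false then
    (st.1, st.2.1.insert v i, st.2.2.insert v (st.2.1.getD v 0))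
  else
    (some (match st.1 with
           | none => 2 * (i - st.2.2.getD v 0)
           | some m => min m (2 * (i - st.2.2.getD v 0))),
     st.2.1.insert v i, st.2.2.insert v (st.2.1.getD v 0))
def runA (l : List Int) : Option Int × PySem.Dict Int Int × PySem.Dict Int Int :=
  (PySem.List.enumerate l).foldl (fun acc p => stA acc p.1 p.2)
    (none, PySem.Dict.empty, PySem.Dict.empty)
lemma enumerate_append (l : List Int) (x : Int) : ∀ (s : Int),
    PySem.List.enumerate (l ++ [x]) s = PySem.List.enumerate l s ++ [(s + l.length, x)] := by
  induction l with
  | nil => intro s; simp [PySem.List.enumerate]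
  | cons a t ih =>
    intro s
    simp only [List.cons_append, PySem.List.enumerate, ih (s+1), List.length_cons]
    have : s + 1 + (t.length : Int) = s + ((t.length + 1 : Nat) : Int) := by push_cast; ring
    rw [this]
lemma map_snd_enumerate (l : List Int) : ∀ (s : Int),
    (PySem.List.enumerate l s).map (fun p => p.2) = l := by
  induction l with
  | nil => intro s; simp [PySem.List.enumerate]
  | cons a t ih => intro s; simp [PySem.List.enumerate, ih]
lemma foldl_opE_comm (ys : List Int) : ∀ (acc : Option Int) (e : Int),
    ys.foldl opE (opE acc e) = opE (ys.foldl opE acc) e := by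
  induction ys with
  | nil => intro acc e; rfl
  | cons y t ih =>
    intro acc e
    have key : opE (opE acc e) y = opE (opE acc y) e := by
      cases acc <;> simp [opE] <;> omega
    simp only [List.foldl_cons, key, ih]
lemma getLast?_dropLast_of_two_le (idx : List Int) (h : 2 ≤ idx.length) :
    idx.dropLast.getLast? = some (idx[idx.length - 2]'(by omega)) := by
  rw [List.getLast?_eq_getElem?]
  rw [List.getElem?_eq_getElem (by simp; omega)]
  simp only [List.getElem_dropLast, List.length_dropLast]
  exact congrArg some (getElem_congr rfl (by omega) (by omega))
lemma occ_append (l : List Int) (x v : Int) :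
    occ (l ++ [x]) v = occ l v ++ (if x = v then [(l.length : Int)] else []) := by
  unfold occ
  rw [enumerate_append l x 0, List.filter_append, List.map_append]
  congr 1
  by_cases h : x = v
  · simp [List.filter, h]
  · have hb : (x == v) = false := by simp [h]
    simp [List.filter, hb, h]

lemma occ_eq_nil_iff (l : List Int) (v : Int) : occ l v = [] ↔ v ∉ l := by
  unfold occ
  rw [List.map_eq_nil_iff, List.filter_eq_nil_iff]
  constructor
  · intro h hv
    have : v ∈ (PySem.List.enumerate l 0).map (fun p => p.2) := by rw [map_snd_enumerate]; exact hv
    obtain ⟨p, hp, hpv⟩ := List.mem_map.mp this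
    exact h p hp (by simp [hpv])
  · intro h p hp hpv
    apply h
    have : p.2 ∈ (PySem.List.enumerate l 0).map (fun p => p.2) := List.mem_map_of_mem hp
    rw [map_snd_enumerate] at this
    simpa [show p.2 = v by simpa using hpv] using this

lemma rg_small (idx : List Int) (h : idx.length ≤ 2) : rg idx = [] := by
  unfold rg
  have : PySem.List.pyRange 2 (PySem.List.len idx) = [] := by
    have := @PySem.List.mem_pyRange_one 2 (PySem.List.len idx)
    cases hr : PySem.List.pyRange 2 (PySem.List.len idx) with
    | nil => rfl
    | cons a t =>
      have ha := (this (x := a)).mp (by rw [hr]; exact List.mem_cons_self)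
      unfold PySem.List.len at ha
      omega
  rw [this]; rfl

lemma rg_append (idx : List Int) (e : Int) (h : 2 ≤ idx.length) :
    rg (idx ++ [e]) = rg idx ++ [2 * (e - idx[idx.length - 2]'(by omega))] := by
  unfold rg
  have hlen : PySem.List.len (idx ++ [e]) = PySem.List.len idx + 1 := by
    simp [PySem.List.len]
  rw [hlen, PySem.List.pyRange_one_succ_right (by unfold PySem.List.len; omega), List.map_append]
  congr 1
  · apply List.map_congr_left
    intro j hj
    have hj' := PySem.List.mem_pyRange_one.mp hj
    unfold PySem.List.len at hj'
    have h1 : PySem.List.pyGetD (idx ++ [e]) j 0 = PySem.List.pyGetD idx j 0 := by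
      rw [PySem.List.pyGetD_eq_getElem _ _ (by omega) (by simp; omega),
          PySem.List.pyGetD_eq_getElem _ _ (by omega) (by omega)]
      exact List.getElem_append_left _
    have h2 : PySem.List.pyGetD (idx ++ [e]) (j - 2) 0 = PySem.List.pyGetD idx (j - 2) 0 := by
      rw [PySem.List.pyGetD_eq_getElem _ _ (by omega) (by simp; omega),
          PySem.List.pyGetD_eq_getElem _ _ (by omega) (by omega)]
      exact List.getElem_append_left _
    rw [h1, h2]
  · have hA : PySem.List.pyGetD (idx ++ [e]) (PySem.List.len idx) 0 = e := by
      rw [PySem.List.pyGetD_eq_getElem _ _ (by unfold PySem.List.len; omega) (by simp [PySem.List.len])]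
      simp [PySem.List.len]
    have hB : PySem.List.pyGetD (idx ++ [e]) (PySem.List.len idx - 2) 0
        = idx[idx.length - 2]'(by omega) := by
      rw [PySem.List.pyGetD_eq_getElem _ _ (by unfold PySem.List.len; omega) (by simp [PySem.List.len])]
      refine Eq.trans (getElem_congr rfl (show ((PySem.List.len idx - 2).toNat) = idx.length - 2 by unfold PySem.List.len; omega) (by simp only [List.length_append, List.length_cons, List.length_nil, PySem.List.len]; omega)) ?_
      exact List.getElem_append_left (by omega)
    simp only [List.map_cons, List.map_nil, hA, hB]

lemma foldl_range_enum {β : Type} (f : β → Int → Int → β) (l : List Int) (init : β) :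
    (PySem.List.pyRange 0 (PySem.List.len l)).foldl
        (fun acc i => f acc i (PySem.List.pyGetD l i 0)) init
      = (PySem.List.enumerate l).foldl (fun acc p => f acc p.1 p.2) init := by
  induction l using List.reverseRecOn with
  | nil => simp [PySem.List.len, PySem.List.pyRange, PySem.List.enumerate]
  | append_singleton t x ih =>
    have hlen : PySem.List.len (t ++ [x]) = PySem.List.len t + 1 := by simp [PySem.List.len]
    rw [hlen, PySem.List.pyRange_one_succ_right (by unfold PySem.List.len; positivity),
        enumerate_append t x 0, List.foldl_append, List.foldl_append]
    have hcongr : (PySem.List.pyRange 0 (PySem.List.len t)).foldl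
        (fun acc i => f acc i (PySem.List.pyGetD (t ++ [x]) i 0)) init
        = (PySem.List.pyRange 0 (PySem.List.len t)).foldl
        (fun acc i => f acc i (PySem.List.pyGetD t i 0)) init := by
      apply PySem.List.foldl_congr_mem
      intro acc i hi
      have hi' := PySem.List.mem_pyRange_one.mp hi
      unfold PySem.List.len at hi'
      rw [PySem.List.pyGetD_eq_getElem _ _ (by omega) (by simp; omega),
          PySem.List.pyGetD_eq_getElem _ _ (by omega) (by omega)]
      rw [List.getElem_append_left (by omega)]
    rw [hcongr, ih]
    simp only [List.foldl_cons, List.foldl_nil, zero_add]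
    congr 1
    rw [PySem.List.pyGetD_eq_getElem _ _ (by unfold PySem.List.len; positivity) (by simp [PySem.List.len])]
    simp [PySem.List.len]

lemma minFold_flatMap_update (S : List Int) (x e : Int) (f f' : Int → List Int)
    (hnd : S.Nodup) (hx : x ∈ S)
    (h : ∀ v ∈ S, v ≠ x → f' v = f v) (hfx : f' x = f x ++ [e]) :
    ∀ (acc : Option Int),
      (S.flatMap f').foldl opE acc = opE ((S.flatMap f).foldl opE acc) e := by
  induction S with
  | nil => cases hx
  | cons a t ih =>
    intro acc
    rcases List.mem_cons.mp hx with rfl | hxt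
    · have hxt : x ∉ t := (List.nodup_cons.mp hnd).1
      have hft : t.flatMap f' = t.flatMap f :=
        List.flatMap_congr (fun v hv => h v (List.mem_cons_of_mem _ hv)
          (fun hveq => hxt (hveq ▸ hv)))
      simp only [List.flatMap_cons, hfx, hft, List.foldl_append, List.foldl_cons, List.foldl_nil]
      rw [foldl_opE_comm]
    · have ha : f' a = f a := by
        rcases eq_or_ne a x with rfl | hne
        · exact absurd hxt (List.nodup_cons.mp hnd).1
        · exact h a List.mem_cons_self hne
      simp only [List.flatMap_cons, ha, List.foldl_append]
      exact ih (List.nodup_cons.mp hnd).2 hxt (fun v hv => h v (List.mem_cons_of_mem _ hv)) _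

lemma ofList_append_not_mem (l : List Int) (x : Int) (hx : x ∉ l) :
    PySem.Set.ofList (l ++ [x]) = PySem.Set.ofList l ++ [x] := by
  rw [PySem.Set.ofList_append_singleton,
      PySem.Set.add_of_not_mem (by simp [PySem.Set.mem_ofList, hx])]

lemma ofList_append_mem (l : List Int) (x : Int) (hx : x ∈ l) :
    PySem.Set.ofList (l ++ [x]) = PySem.Set.ofList l := by
  rw [PySem.Set.ofList_append_singleton,
      PySem.Set.add_of_mem (by simp [PySem.Set.mem_ofList, hx])]

lemma runA_append (l : List Int) (x : Int) :
    runA (l ++ [x]) = stA (runA l) (l.length : Int) x := by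
  unfold runA
  rw [show PySem.List.enumerate (l ++ [x]) = PySem.List.enumerate (l ++ [x]) 0 from rfl,
      enumerate_append l x 0, List.foldl_append]
  simp

lemma invariantA (l : List Int) :
    (∀ v, (runA l).2.1.get? v = (occ l v).getLast?)
    ∧ (∀ v, (runA l).2.2.get? v = (occ l v).dropLast.getLast?)
    ∧ (runA l).1 = minFold (gapsAll l) := by
  induction l using List.reverseRecOn with
  | nil =>
    refine ⟨fun v => ?_, fun v => ?_, ?_⟩ <;>
      simp [runA, PySem.List.enumerate, occ, gapsAll, minFold, PySem.Set.ofList,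
        PySem.Dict.get?_empty]
  | append_singleton l x ih =>
    obtain ⟨h1, h2, h3⟩ := ih
    rw [runA_append]
    have hocc_ne : ∀ v, v ≠ x → occ (l ++ [x]) v = occ l v := by
      intro v hv
      rw [occ_append, if_neg (fun h : x = v => hv h.symm)]
      simp
    have hocc_x : occ (l ++ [x]) x = occ l x ++ [(l.length : Int)] := by
      rw [occ_append]; simp
    by_cases hG0 : occ l x = []
    · -- first occurrence of x
      have hc1 : (runA l).2.1.contains x = false := by
        rw [PySem.Dict.contains_eq_isSome_get?, h1, hG0]; rfl
      have hx_not : x ∉ l := (occ_eq_nil_iff l x).mp hG0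
      refine ⟨fun v => ?_, fun v => ?_, ?_⟩
      · rw [show stA (runA l) (l.length : Int) x
              = ((runA l).1, (runA l).2.1.insert x (l.length : Int), (runA l).2.2) by
            simp [stA, hc1]]
        by_cases hv : v = x
        · subst hv
          rw [PySem.Dict.get?_insert_self, hocc_x, hG0]
          simp
        · rw [PySem.Dict.get?_insert_of_ne _ _ hv, h1, hocc_ne v hv]
      · rw [show stA (runA l) (l.length : Int) x
              = ((runA l).1, (runA l).2.1.insert x (l.length : Int), (runA l).2.2) by
            simp [stA, hc1]]
        by_cases hv : v = x
        · subst hv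
          rw [h2, hocc_x, hG0]
          simp
        · rw [h2, hocc_ne v hv]
      · rw [show stA (runA l) (l.length : Int) x
              = ((runA l).1, (runA l).2.1.insert x (l.length : Int), (runA l).2.2) by
            simp [stA, hc1]]
        rw [h3]
        unfold gapsAll
        rw [ofList_append_not_mem l x hx_not, List.flatMap_append]
        have hxg : rg (occ (l ++ [x]) x) = [] := by
          rw [hocc_x, hG0]
          exact rg_small _ (by simp)
        have hcong : (PySem.Set.ofList l).flatMap (fun v => rg (occ (l ++ [x]) v))
            = (PySem.Set.ofList l).flatMap (fun v => rg (occ l v)) := by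
          apply List.flatMap_congr
          intro v hv
          have : v ∈ l := (PySem.Set.mem_ofList l v).mp hv
          rw [hocc_ne v (fun hvx => hx_not (hvx ▸ this))]
        simp [hxg, hcong]
    · have hmem : x ∈ l := by
        by_contra hnot
        exact hG0 ((occ_eq_nil_iff l x).mpr hnot)
      have hc1 : (runA l).2.1.contains x = true := by
        rw [PySem.Dict.contains_eq_isSome_get?, h1]
        cases hG : occ l x with
        | nil => exact absurd hG hG0
        | cons a t => simp [List.getLast?_isSome]
      by_cases hG1 : (occ l x).dropLast = []
      · -- second occurrence of x
        have hlen1 : (occ l x).length = 1 := by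
          have := List.length_dropLast (xs := occ l x)
          have h0 : (occ l x).length ≠ 0 := by simpa [List.length_eq_zero_iff] using hG0
          have h1' : (occ l x).dropLast.length = 0 := by simp [hG1]
          omega
        have hc2 : (runA l).2.2.contains x = false := by
          rw [PySem.Dict.contains_eq_isSome_get?, h2, hG1]; rfl
        have hred : stA (runA l) (l.length : Int) x
            = ((runA l).1, (runA l).2.1.insert x (l.length : Int),
               (runA l).2.2.insert x ((runA l).2.1.getD x 0)) := by
          simp [stA, hc1, hc2]
        refine ⟨fun v => ?_, fun v => ?_, ?_⟩
        · rw [hred]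
          by_cases hv : v = x
          · subst hv
            rw [PySem.Dict.get?_insert_self, hocc_x, List.getLast?_concat]
          · rw [PySem.Dict.get?_insert_of_ne _ _ hv, h1, hocc_ne v hv]
        · rw [hred]
          by_cases hv : v = x
          · subst hv
            rw [PySem.Dict.get?_insert_self, hocc_x, List.dropLast_concat,
               PySem.Dict.getD_eq_get?_getD, h1, List.getLast?_eq_some_getLast hG0]
            rfl
          · rw [PySem.Dict.get?_insert_of_ne _ _ hv, h2, hocc_ne v hv]
        · rw [hred, h3]
          unfold gapsAll
          rw [ofList_append_mem l x hmem]
          congr 1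
          apply List.flatMap_congr
          intro v hv
          by_cases hvx : v = x
          · subst hvx
            rw [hocc_x, rg_small _ (by simp [hlen1]), rg_small _ (by simp [hlen1])]
          · rw [hocc_ne v hvx]
      · -- third or later occurrence of x
        have hlen2 : 2 ≤ (occ l x).length := by
          have h0 : (occ l x).length ≠ 0 := by simpa [List.length_eq_zero_iff] using hG0
          have h1' : (occ l x).dropLast.length ≠ 0 := by
            simp only [ne_eq, List.length_eq_zero_iff]
            exact hG1
          have := List.length_dropLast (xs := occ l x)
          omega
        have hc2 : (runA l).2.2.contains x = true := by
          rw [PySem.Dict.contains_eq_isSome_get?, h2, getLast?_dropLast_of_two_le _ hlen2]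
          rfl
        have hgd2 : (runA l).2.2.getD x 0 = (occ l x)[(occ l x).length - 2]'(by omega) := by
          rw [PySem.Dict.getD_eq_get?_getD, h2, getLast?_dropLast_of_two_le _ hlen2]
          rfl
        have hgd1 : (runA l).2.1.getD x 0 = (occ l x).getLast hG0 := by
          rw [PySem.Dict.getD_eq_get?_getD, h1, List.getLast?_eq_some_getLast hG0]
          rfl
        have hred : stA (runA l) (l.length : Int) x
            = (opE (runA l).1 (2 * ((l.length : Int) - (runA l).2.2.getD x 0)),
               (runA l).2.1.insert x (l.length : Int),
               (runA l).2.2.insert x ((runA l).2.1.getD x 0)) := by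
          simp [stA, hc1, hc2, opE]
        refine ⟨fun v => ?_, fun v => ?_, ?_⟩
        · rw [hred]
          by_cases hv : v = x
          · subst hv
            rw [PySem.Dict.get?_insert_self, hocc_x, List.getLast?_concat]
          · rw [PySem.Dict.get?_insert_of_ne _ _ hv, h1, hocc_ne v hv]
        · rw [hred]
          by_cases hv : v = x
          · subst hv
            rw [PySem.Dict.get?_insert_self, hocc_x, List.dropLast_concat, hgd1,
               List.getLast?_eq_some_getLast hG0]
          · rw [PySem.Dict.get?_insert_of_ne _ _ hv, h2, hocc_ne v hv]
        · rw [hred, h3, hgd2]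
          unfold gapsAll
          rw [ofList_append_mem l x hmem]
          have hupd := minFold_flatMap_update (PySem.Set.ofList l) x
            (2 * ((l.length : Int) - (occ l x)[(occ l x).length - 2]'(by omega)))
            (fun v => rg (occ l v)) (fun v => rg (occ (l ++ [x]) v))
            (PySem.Set.nodup_ofList l) ((PySem.Set.mem_ofList l x).mpr hmem)
            (fun v _ hvx => by
              show rg (occ (l ++ [x]) v) = rg (occ l v)
              rw [hocc_ne v hvx])
            (by
              show rg (occ (l ++ [x]) x) = rg (occ l x)
                ++ [2 * ((l.length : Int) - (occ l x)[(occ l x).length - 2]'(by omega))]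
              rw [hocc_x]
              exact rg_append _ _ hlen2)
            none
          unfold minFold
          rw [hupd]

lemma min?_eq_minFold (xs : List Int) :
    PySem.List.min? xs (fun x => x) = minFold xs := by
  unfold PySem.List.min? minFold
  congr 1
  funext acc x
  cases acc with
  | none => rfl
  | some m =>
    show (if x < m then some x else some m) = opE (some m) x
    by_cases h : x < m
    · simp [opE, h, min_def, show ¬ m ≤ x by omega]
    · simp [opE, h, show m ≤ x by omega]

lemma minimumDistance_eq_minFold (nums : List Int) :
    minimumDistance nums = match minFold (gapsAll nums) with | none => -1 | some m => m := by
  have h := (invariantA nums).2.2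
  have he : (PySem.List.pyRange 0 (PySem.List.len nums)).foldl
      (fun (st : Option Int × PySem.Dict Int Int × PySem.Dict Int Int) i =>
        stA st i (PySem.List.pyGetD nums i 0)) (none, PySem.Dict.empty, PySem.Dict.empty)
      = runA nums := by
    rw [foldl_range_enum stA nums]
    rfl
  show (match ((PySem.List.pyRange 0 (PySem.List.len nums)).foldl
      (fun (st : Option Int × PySem.Dict Int Int × PySem.Dict Int Int) i =>
        stA st i (PySem.List.pyGetD nums i 0)) (none, PySem.Dict.empty, PySem.Dict.empty)).1 with
    | none => -1 | some m => m) = _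
  rw [he, h]

lemma alt_eq_minFold (nums : List Int) :
    minimumDistance_alt nums = match minFold (gapsAll nums) with | none => -1 | some m => m := by
  unfold minimumDistance_alt
  have hnodup : ((PySem.List.enumerate nums).foldl
      (fun (d : PySem.Dict Int (List Int)) p => d.modify p.2 [] (fun l => l ++ [p.1]))
      PySem.Dict.empty).keys.Nodup :=
    PySem.Dict.nodup_keys_foldl_modify_key (PySem.List.enumerate nums) (fun p => p.2) []
      (fun d p l => l ++ [p.1]) PySem.Dict.empty PySem.Dict.nodup_keys_empty
  have hkeys : ((PySem.List.enumerate nums).foldl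
      (fun (d : PySem.Dict Int (List Int)) p => d.modify p.2 [] (fun l => l ++ [p.1]))
      PySem.Dict.empty).keys = PySem.Set.ofList nums := by
    rw [PySem.Dict.keys_foldl_modify_key (PySem.List.enumerate nums) (fun p => p.2) []
      (fun d p l => l ++ [p.1]) PySem.Dict.empty, PySem.Dict.keys_empty,
      PySem.Set.update_nil_left, map_snd_enumerate nums 0]
  have hgetD : ∀ v, ((PySem.List.enumerate nums).foldl
      (fun (d : PySem.Dict Int (List Int)) p => d.modify p.2 [] (fun l => l ++ [p.1]))
      PySem.Dict.empty).getD v [] = occ nums v := by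
    intro v
    rw [show (PySem.List.enumerate nums).foldl
        (fun (d : PySem.Dict Int (List Int)) p => d.modify p.2 [] (fun l => l ++ [p.1]))
        PySem.Dict.empty
      = ((PySem.List.enumerate nums).map (fun p => (p.2, p.1))).foldl
        (fun d q => d.modify q.1 [] (fun l => l ++ [q.2])) PySem.Dict.empty from
      by rw [List.foldl_map]]
    rw [PySem.Dict.getD_foldl_modify_append, PySem.Dict.getD_empty]
    unfold occ
    simp [List.filter_map, List.map_map, Function.comp_def]
  show PySem.List.minD (((PySem.List.enumerate nums).foldl
      (fun (d : PySem.Dict Int (List Int)) p => d.modify p.2 [] (fun l => l ++ [p.1]))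
      PySem.Dict.empty).values.flatMap (fun idx =>
        (PySem.List.pyRange 2 (PySem.List.len idx)).map
          (fun j => 2 * (PySem.List.pyGetD idx j 0 - PySem.List.pyGetD idx (j - 2) 0))))
        (fun x => x) (-1) = _
  rw [PySem.Dict.values_eq_map_keys _ hnodup [], hkeys, List.flatMap_map]
  have hflat : (PySem.Set.ofList nums).flatMap
      (fun k => (fun idx => (PySem.List.pyRange 2 (PySem.List.len idx)).map
        (fun j => 2 * (PySem.List.pyGetD idx j 0 - PySem.List.pyGetD idx (j - 2) 0)))
        (((PySem.List.enumerate nums).foldl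
          (fun (d : PySem.Dict Int (List Int)) p => d.modify p.2 [] (fun l => l ++ [p.1]))
          PySem.Dict.empty).getD k []))
      = gapsAll nums := by
    unfold gapsAll
    apply List.flatMap_congr
    intro v _
    show rg (((PySem.List.enumerate nums).foldl
          (fun (d : PySem.Dict Int (List Int)) p => d.modify p.2 [] (fun l => l ++ [p.1]))
          PySem.Dict.empty).getD v []) = rg (occ nums v)
    rw [hgetD v]
  rw [hflat]
  show PySem.List.minD (gapsAll nums) (fun x => x) (-1) = _
  unfold PySem.List.minD
  rw [min?_eq_minFold]
  cases minFold (gapsAll nums) <;> rfl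

-- ===== VERDICT (by name: the statement is the Claim_ definition above) =====
theorem minimumDistance_spec : Claim_equal_minimumDistance := by
  intro nums _
  unfold Spec_minimumDistance
  rw [minimumDistance_eq_minFold, alt_eq_minFold]
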